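-- pv_equiv track=rewrite | github.com/sahilshingate01/incident-response-env | environment.py | _match_scenario_action
-- ===== SOURCE A (Python) =====
-- from typing import Dict, List, Optional
--
-- def _match_scenario_action(action_key: str, scenario_actions: List[str]) -> str | None:
--     if action_key in scenario_actions:
--         return action_key
--     for sa in scenario_actions:
--         if "_" not in sa and action_key.startswith(sa + "_"):
--             return sa
--         if sa == action_key.split("_", 1)[0] and "_" not in sa:
--             return sa
--     return None
-- ===== SOURCE B (Python) =====
-- from typing import List
--
--
-- def _match_scenario_action(action_key: str, scenario_actions: List[str]) -> str | None:
--     # Single pass with boolean accumulators: the only candidates A can ever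
--     # return are action_key itself and its first '_'-token (every sa that
--     # fires A's loop equals that token), so one fold over the list recording
--     # whether each candidate occurs suffices; the decision is made afterwards.
--     tok_chars = []
--     for c in action_key:
--         if c == "_":
--             break
--         tok_chars.append(c)
--     tok = "".join(tok_chars)
--     has_exact = False
--     has_tok = False
--     for s in scenario_actions:
--         has_exact = has_exact or s == action_key
--         has_tok = has_tok or s == tok
--     if has_exact:
--         return action_key
--     if has_tok:
--         return tok
--     return None
-- ===== Notes on version B (the rewrite author's own statement) =====
-- stated objective: alternative
-- what changed: B replaces A's early-return scan with startswith/substring tests by one accumulator fold: it extracts action_key's first '_'-token by a character scan once, records in a single pass over scenario_actions whether the exact key and the token occur, and decides afterwards.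
import Mathlib
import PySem

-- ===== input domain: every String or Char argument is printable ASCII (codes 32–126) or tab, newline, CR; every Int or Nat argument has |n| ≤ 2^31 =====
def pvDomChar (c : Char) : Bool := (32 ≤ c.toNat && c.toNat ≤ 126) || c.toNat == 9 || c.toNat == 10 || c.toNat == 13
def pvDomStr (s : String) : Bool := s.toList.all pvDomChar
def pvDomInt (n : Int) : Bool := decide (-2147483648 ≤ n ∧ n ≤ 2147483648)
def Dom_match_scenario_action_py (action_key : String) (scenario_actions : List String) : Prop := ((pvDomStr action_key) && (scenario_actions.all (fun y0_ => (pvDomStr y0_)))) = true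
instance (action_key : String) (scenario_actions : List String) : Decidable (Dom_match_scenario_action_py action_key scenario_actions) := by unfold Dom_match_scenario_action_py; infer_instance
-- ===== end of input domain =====

-- B replaces A's early-return scan (startswith / substring tests) with a character scan for the
-- first '_'-token plus one boolean-accumulator fold over the list (objective: alternative);
-- proved equal to A on all inputs.


-- ===== PORT A =====
-- s.split("_", 1)[0]  (split with a nonempty separator is always `some` and nonempty,
-- so the "" defaults below are unreachable; proved exact in pvFirstTok_eq below)
def pvFirstTok (s : String) : String :=
  match PySem.Str.splitMax? s "_" 1 with
  | some (t :: _) => t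
  | _ => ""

-- the 'for sa in scenario_actions' loop of A, branches in A's order
def pvMatchLoopA (action_key : String) : List String → Option String
  | [] => none
  | sa :: rest =>
    if PySem.Str.isIn "_" sa = false ∧ PySem.Str.startswith action_key (sa ++ "_") = true then
      some sa
    else if sa = pvFirstTok action_key ∧ PySem.Str.isIn "_" sa = false then
      some sa
    else pvMatchLoopA action_key rest

def match_scenario_action_py (action_key : String) (scenario_actions : List String) : Option String :=
  if action_key ∈ scenario_actions then some action_key
  else pvMatchLoopA action_key scenario_actions

-- ===== PORT B =====
-- the 'for c in action_key: if c == "_": break; tok_chars.append(c)' scan of Source B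
def pvTokChars : List Char → List Char
  | [] => []
  | c :: rest => if c = '_' then [] else c :: pvTokChars rest

def match_scenario_action_py_alt (action_key : String) (scenario_actions : List String) : Option String :=
  let tok := String.ofList (pvTokChars action_key.toList)
  let fl := scenario_actions.foldl
    (fun (p : Bool × Bool) s => (p.1 || s == action_key, p.2 || s == tok)) (false, false)
  if fl.1 then some action_key
  else if fl.2 then some tok
  else none

-- ===== PRECONDITION & SPEC =====
def Spec_match_scenario_action_py (action_key : String) (scenario_actions : List String) (out : Option String) : Prop := out = match_scenario_action_py_alt action_key scenario_actions
instance (action_key : String) (scenario_actions : List String) (out : Option String) : Decidable (Spec_match_scenario_action_py action_key scenario_actions out) := by unfold Spec_match_scenario_action_py; infer_instance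

-- ===== CLAIM (what is proved, stated in full; the proofs are below) =====
def Claim_equal_match_scenario_action_py : Prop := ∀ (action_key : String) (scenario_actions : List String), Dom_match_scenario_action_py action_key scenario_actions → Spec_match_scenario_action_py action_key scenario_actions (match_scenario_action_py action_key scenario_actions)

-- ===== LEMMAS AND PROOFS =====

-- the head of split("_", 1)'s worker is takeWhile (· ≠ '_')
theorem pv_go_head (fuel : Nat) : ∀ (l cur : List Char), l.length < fuel →
    (PySem.Chars.splitOnMax.go ['_'] fuel 1 l cur []).head? =
      some (cur.reverse ++ l.takeWhile (· ≠ '_')) := by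
  induction fuel with
  | zero => intro l cur h; omega
  | succ n ih =>
    intro l cur h
    cases l with
    | nil => simp [PySem.Chars.splitOnMax.go]
    | cons c rest =>
      by_cases hc : c = '_'
      · subst hc
        simp [PySem.Chars.splitOnMax.go, List.isPrefixOf]
        cases n with
        | zero => simp [PySem.Chars.splitOnMax.go]
        | succ m =>
          cases rest with
          | nil => simp [PySem.Chars.splitOnMax.go]
          | cons d ds => simp [PySem.Chars.splitOnMax.go]
      · have : (['_'].isPrefixOf (c :: rest)) = false := by
          simp [List.isPrefixOf]
          exact fun h' => hc h'.symm
        simp [PySem.Chars.splitOnMax.go, this, hc]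
        rw [ih rest (c :: cur) (by simp at h ⊢; omega)]
        simp

theorem pvFirstTok_eq (s : String) :
    pvFirstTok s = String.ofList (s.toList.takeWhile (· ≠ '_')) := by
  have h := pv_go_head (s.toList.length + 1) s.toList [] (by omega)
  unfold pvFirstTok PySem.Str.splitMax? PySem.Chars.splitMax? PySem.Chars.splitOnMax
  norm_num
  simp only [← String.length_toList]
  cases hg : PySem.Chars.splitOnMax.go ['_'] (s.toList.length + 1) 1 s.toList [] [] with
  | nil => rw [hg] at h; simp at h
  | cons a tl =>
    rw [hg] at h
    simp at h
    rw [if_neg (by decide : ¬("_" : String) = "")]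
    rw [show ("_" : String).toList = ['_'] from rfl, hg]
    simp [h]

-- Source B's character scan is takeWhile (· ≠ '_')
theorem pvTokChars_eq (l : List Char) : pvTokChars l = l.takeWhile (· ≠ '_') := by
  induction l with
  | nil => rfl
  | cons c rest ih =>
    by_cases hc : c = '_'
    · simp [pvTokChars, hc]
    · simp [pvTokChars, hc, ih]

-- hence the two token computations agree
theorem pvTok_eq_firstTok (s : String) :
    String.ofList (pvTokChars s.toList) = pvFirstTok s := by
  rw [pvTokChars_eq, pvFirstTok_eq]

-- the first token contains no '_'
theorem pv_tok_no_underscore (s : String) :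
    PySem.Str.isIn "_" (pvFirstTok s) = false := by
  rw [pvFirstTok_eq, PySem.Str.isIn_eq, show ("_" : String).toList = ['_'] from rfl]
  simp only [String.toList_ofList]
  rw [PySem.Chars.isIn_eq_false_iff]
  intro hinf
  have hm : '_' ∈ s.toList.takeWhile (· ≠ '_') :=
    hinf.sublist.subset (List.mem_singleton_self '_')
  have := List.mem_takeWhile_imp hm
  simp at this

-- all-non-'_' prefix followed by '_' is exactly what takeWhile keeps
theorem pv_takeWhile_split (xs r : List Char) (h : ∀ c ∈ xs, c ≠ '_') :
    ((xs ++ '_' :: r).takeWhile (· ≠ '_')) = xs := by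
  induction xs with
  | nil => simp
  | cons x t ih =>
    have hx : x ≠ '_' := h x (by simp)
    rw [List.cons_append, List.takeWhile_cons, if_pos (by simpa using hx),
      ih (fun c hc => h c (by simp [hc]))]

-- A's loop can only fire on sa = first token of action_key
theorem pv_cond_iff (ak sa : String) :
    ((PySem.Str.isIn "_" sa = false ∧ PySem.Str.startswith ak (sa ++ "_") = true) ∨
      (sa = pvFirstTok ak ∧ PySem.Str.isIn "_" sa = false)) ↔ sa = pvFirstTok ak := by
  constructor
  · rintro (⟨hno, hsw⟩ | ⟨heq, _⟩)
    · rw [PySem.Str.startswith_eq] at hsw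
      have hp : (sa ++ "_").toList <+: ak.toList := (PySem.Chars.startswith_iff _ _).1 hsw
      rw [String.toList_append, show ("_" : String).toList = ['_'] from rfl] at hp
      obtain ⟨r, hr⟩ := hp
      have hns : ∀ c ∈ sa.toList, c ≠ '_' := by
        intro c hc hc'
        rw [PySem.Str.isIn_eq, show ("_" : String).toList = ['_'] from rfl] at hno
        obtain ⟨u, v, huv⟩ := List.append_of_mem hc
        exact (PySem.Chars.isIn_eq_false_iff _ _).1 hno ⟨u, v, by simp [huv, hc']⟩
      rw [pvFirstTok_eq, ← hr]
      have hsplit : sa.toList ++ ['_'] ++ r = sa.toList ++ '_' :: r := by simp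
      rw [hsplit, pv_takeWhile_split sa.toList r hns, String.ofList_toList]
    · exact heq
  · intro heq
    exact Or.inr ⟨heq, heq ▸ pv_tok_no_underscore ak⟩

theorem pv_loop_eq (ak : String) (sas : List String) :
    pvMatchLoopA ak sas = if pvFirstTok ak ∈ sas then some (pvFirstTok ak) else none := by
  induction sas with
  | nil => simp [pvMatchLoopA]
  | cons sa rest ih =>
    by_cases hsa : sa = pvFirstTok ak
    · have hmem : pvFirstTok ak ∈ sa :: rest := by simp [← hsa]
      rcases (pv_cond_iff ak sa).2 hsa with hc | hc
      · simp only [pvMatchLoopA]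
        rw [if_pos hc, if_pos hmem, hsa]
      · simp only [pvMatchLoopA]
        by_cases h1 : PySem.Str.isIn "_" sa = false ∧ PySem.Str.startswith ak (sa ++ "_") = true
        · rw [if_pos h1, if_pos hmem, hsa]
        · rw [if_neg h1, if_pos hc, if_pos hmem, hsa]
    · have h1 : ¬(PySem.Str.isIn "_" sa = false ∧ PySem.Str.startswith ak (sa ++ "_") = true) :=
        fun hc => hsa ((pv_cond_iff ak sa).1 (Or.inl hc))
      have h2 : ¬(sa = pvFirstTok ak ∧ PySem.Str.isIn "_" sa = false) :=
        fun hc => hsa ((pv_cond_iff ak sa).1 (Or.inr hc))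
      have hmem : (pvFirstTok ak ∈ sa :: rest) ↔ pvFirstTok ak ∈ rest := by
        simp only [List.mem_cons, or_iff_right_iff_imp]
        exact fun h => absurd h.symm hsa
      simp only [pvMatchLoopA]
      rw [if_neg h1, if_neg h2, ih, if_congr hmem rfl rfl]

-- B's fold computes the two membership flags
theorem pv_fold_flags (ak tok : String) (sas : List String) : ∀ p : Bool × Bool,
    sas.foldl (fun (p : Bool × Bool) s => (p.1 || s == ak, p.2 || s == tok)) p =
      (p.1 || decide (ak ∈ sas), p.2 || decide (tok ∈ sas)) := by
  induction sas with
  | nil => intro p; simp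
  | cons s rest ih =>
    intro p
    rw [List.foldl_cons, ih]
    simp [Bool.or_assoc, beq_eq_decide, eq_comm]

-- ===== VERDICT (by name: the statement is the Claim_ definition above) =====
theorem match_scenario_action_py_spec : Claim_equal_match_scenario_action_py := by
  intro ak sas _
  unfold Spec_match_scenario_action_py match_scenario_action_py match_scenario_action_py_alt
  simp only []
  rw [pvTok_eq_firstTok, pv_fold_flags ak (pvFirstTok ak) sas (false, false), pv_loop_eq]
  by_cases h : ak ∈ sas
  · simp [h]
  · by_cases h2 : pvFirstTok ak ∈ sas <;> simp [h, h2]
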